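-- pv_equiv track=rewrite | github.com/doreenhii/SentimentAnalysisPipeline | SentimentModelFunctions.py | detect_neg_scope_window
-- ===== SOURCE A (Python) =====
-- def isNegator(word):
--     negators = ["cannot", "n't", "no", "never", "not", "nothing", "nobody"]
--     if(word in negators):
--         return True
--     else:
--         return False
--
-- def detect_neg_scope_window(sentence_sequence, window_size = 0):
--     neg_scope = []
--     num_scopes = 0
--     last_scope_count = 0
--
--     for i in range(len(sentence_sequence)):
--
--         if(isNegator(sentence_sequence[i])):
--             num_scopes += 1
--             last_scope_count = 0
--
--         elif(num_scopes > 0):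
--             for j in range(num_scopes):
--                 neg_scope.append(i)
--
--             if(window_size > 0): #window_size = 0 signifies end-of-sentence scope
--                 last_scope_count += 1
--                 if(last_scope_count >= window_size):
--                     num_scopes = 0
--                     last_scope_count = 0
--
--     return neg_scope
-- ===== SOURCE B (Python) =====
-- def isNegator(word):
--     negators = ["cannot", "n't", "no", "never", "not", "nothing", "nobody"]
--     if(word in negators):
--         return True
--     else:
--         return False
--
-- def detect_neg_scope_window(sentence_sequence, window_size = 0):
--     # Pass 1: build counts[i] = number of active scopes covering word i (0 for negators)
--     counts = []
--     num_scopes = 0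
--     last_scope_count = 0
--     for word in sentence_sequence:
--         if isNegator(word):
--             counts.append(0)
--             num_scopes += 1
--             last_scope_count = 0
--         else:
--             counts.append(num_scopes)
--             if num_scopes > 0 and window_size > 0:
--                 last_scope_count += 1
--                 if last_scope_count >= window_size:
--                     num_scopes = 0
--                     last_scope_count = 0
--     # Pass 2: flatten the table into the index list
--     neg_scope = []
--     for i, c in enumerate(counts):
--         neg_scope.extend([i] * c)
--     return neg_scope
-- ===== Notes on version B (the rewrite author's own statement) =====
-- stated objective: alternative
-- what changed: A's single stateful loop that emits scope indices inline is split into a pass building a counts table (scope count per word) plus a second flattening pass that extends the output with [i]*counts[i].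
import Mathlib
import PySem

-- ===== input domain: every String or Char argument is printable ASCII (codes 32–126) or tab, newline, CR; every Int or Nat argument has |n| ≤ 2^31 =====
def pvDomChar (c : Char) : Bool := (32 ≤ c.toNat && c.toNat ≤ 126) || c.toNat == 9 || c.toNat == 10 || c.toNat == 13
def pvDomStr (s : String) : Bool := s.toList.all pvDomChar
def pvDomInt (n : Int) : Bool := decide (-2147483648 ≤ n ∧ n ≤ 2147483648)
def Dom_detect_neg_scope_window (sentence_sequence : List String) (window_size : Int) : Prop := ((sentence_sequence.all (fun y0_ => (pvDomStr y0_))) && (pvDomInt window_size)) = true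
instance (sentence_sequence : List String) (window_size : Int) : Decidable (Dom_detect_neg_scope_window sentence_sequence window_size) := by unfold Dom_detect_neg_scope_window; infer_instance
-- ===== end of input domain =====

-- B replaces A's single stateful emit-loop by a counts-table pass plus a flattening pass (objective: alternative decomposition, same cost).

-- ===== PORT A =====
def isNegatorPy (word : String) : Bool :=
  if word ∈ ["cannot", "n't", "no", "never", "not", "nothing", "nobody"] then true else false

-- A's loop: walks words with index i, state (num_scopes, last_scope_count), emitting indices directly.
def aLoop (window_size : Int) : List String → Int → Int → Int → List Int
  | [], _, _, _ => []
  | w :: ws, i, ns, lsc =>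
    if isNegatorPy w then
      aLoop window_size ws (i + 1) (ns + 1) 0
    else if ns > 0 then
      List.replicate ns.toNat i ++
        (if window_size > 0 then
          (if lsc + 1 ≥ window_size then aLoop window_size ws (i + 1) 0 0
           else aLoop window_size ws (i + 1) ns (lsc + 1))
         else aLoop window_size ws (i + 1) ns lsc)
    else
      aLoop window_size ws (i + 1) ns lsc

def detect_neg_scope_window (sentence_sequence : List String) (window_size : Int) : List Int :=
  aLoop window_size sentence_sequence 0 0 0

-- ===== PORT B =====
-- B pass 1: counts[i] = active scope count at word i (0 for negators).
def bCounts (window_size : Int) : List String → Int → Int → List Int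
  | [], _, _ => []
  | w :: ws, ns, lsc =>
    if isNegatorPy w then
      0 :: bCounts window_size ws (ns + 1) 0
    else
      ns ::
        (if ns > 0 && window_size > 0 then
          (if lsc + 1 ≥ window_size then bCounts window_size ws 0 0
           else bCounts window_size ws ns (lsc + 1))
         else bCounts window_size ws ns lsc)

-- B pass 2: neg_scope.extend([i] * c) for each entry.
def bFlatten : List Int → Int → List Int
  | [], _ => []
  | c :: cs, i => List.replicate c.toNat i ++ bFlatten cs (i + 1)

def detect_neg_scope_window_alt (sentence_sequence : List String) (window_size : Int) : List Int :=
  bFlatten (bCounts window_size sentence_sequence 0 0) 0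

-- ===== PRECONDITION & SPEC =====
def Spec_detect_neg_scope_window (sentence_sequence : List String) (window_size : Int) (out : List Int) : Prop := out = detect_neg_scope_window_alt sentence_sequence window_size
instance (sentence_sequence : List String) (window_size : Int) (out : List Int) : Decidable (Spec_detect_neg_scope_window sentence_sequence window_size out) := by unfold Spec_detect_neg_scope_window; infer_instance

-- ===== CLAIM (what is proved, stated in full; the proofs are below) =====
def Claim_equal_detect_neg_scope_window : Prop := ∀ (sentence_sequence : List String) (window_size : Int), Dom_detect_neg_scope_window sentence_sequence window_size → Spec_detect_neg_scope_window sentence_sequence window_size (detect_neg_scope_window sentence_sequence window_size)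

-- ===== LEMMAS AND PROOFS =====
-- The two loops maintain the same (num_scopes, last_scope_count) state; flattening B's
-- counts table from index i reproduces A's direct emission (num_scopes stays ≥ 0).
theorem aLoop_eq_flatten (window_size : Int) (ws : List String) :
    ∀ (i ns lsc : Int), 0 ≤ ns →
      aLoop window_size ws i ns lsc = bFlatten (bCounts window_size ws ns lsc) i := by
  induction ws with
  | nil => intro i ns lsc _; rfl
  | cons w ws ih =>
    intro i ns lsc hns
    by_cases hneg : isNegatorPy w = true
    · simp [aLoop, bCounts, bFlatten, hneg, ih (i + 1) (ns + 1) 0 (by omega)]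
    · by_cases hpos : ns > 0
      · by_cases hwin : window_size > 0
        · by_cases hexp : lsc + 1 ≥ window_size
          · simp [aLoop, bCounts, bFlatten, hneg, hpos, hwin, hexp, ih (i + 1) 0 0 le_rfl]
          · simp [aLoop, bCounts, bFlatten, hneg, hpos, hwin, hexp, ih (i + 1) ns (lsc + 1) hns]
        · simp [aLoop, bCounts, bFlatten, hneg, hpos, hwin, ih (i + 1) ns lsc hns]
      · have hz : ns = 0 := by omega
        subst hz
        simp [aLoop, bCounts, bFlatten, hneg, ih (i + 1) 0 lsc le_rfl]

-- ===== VERDICT (by name: the statement is the Claim_ definition above) =====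
theorem detect_neg_scope_window_spec : Claim_equal_detect_neg_scope_window := by
  intro seq win _
  unfold Spec_detect_neg_scope_window detect_neg_scope_window detect_neg_scope_window_alt
  exact aLoop_eq_flatten win seq 0 0 0 le_rfl
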